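-- pv_equiv track=rewrite | github.com/vijaikrish/blade_sorting | Genetic_algorithm_example.py | group_neighbours
-- ===== SOURCE A (Python) =====
-- from itertools import groupby
--
-- def sort_edges(individual):
--     # individual.sort(lambda x, y: cmp(x[0],y[0]))
--     individual.sort()
--
-- def group_neighbours(neighbours):
--     sorted_neighbours = []
--
--     # store length of each individual neighbour + neighbour in a list
--     for neighbour in neighbours:
--         sorted_neighbours.append((len(neighbour[1]), neighbour))
--
--     # sort the new list
--     sort_edges(sorted_neighbours)
--
--     # group the neighbour by their size
--     groups = []
--     for k, g in groupby(sorted_neighbours, lambda x: x[0]):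
--         groups.append(list(g))
--
--     return groups
-- ===== SOURCE B (Python) =====
-- def group_neighbours(neighbours):
--     # Per-length selection instead of global sort + groupby: decorate once,
--     # then for each distinct length (ascending) emit that length's bucket, sorted.
--     decorated = [(len(nb[1]), nb) for nb in neighbours]
--     return [sorted(x for x in decorated if x[0] == k)
--             for k in sorted({x[0] for x in decorated})]
-- ===== Notes on version B (the rewrite author's own statement) =====
-- stated objective: alternative
-- what changed: Replaces A's decorate + global sort + itertools.groupby over consecutive runs by per-length selection: collect the distinct lengths, iterate them in sorted order, and for each length filter-and-sort that bucket.
import Mathlib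
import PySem

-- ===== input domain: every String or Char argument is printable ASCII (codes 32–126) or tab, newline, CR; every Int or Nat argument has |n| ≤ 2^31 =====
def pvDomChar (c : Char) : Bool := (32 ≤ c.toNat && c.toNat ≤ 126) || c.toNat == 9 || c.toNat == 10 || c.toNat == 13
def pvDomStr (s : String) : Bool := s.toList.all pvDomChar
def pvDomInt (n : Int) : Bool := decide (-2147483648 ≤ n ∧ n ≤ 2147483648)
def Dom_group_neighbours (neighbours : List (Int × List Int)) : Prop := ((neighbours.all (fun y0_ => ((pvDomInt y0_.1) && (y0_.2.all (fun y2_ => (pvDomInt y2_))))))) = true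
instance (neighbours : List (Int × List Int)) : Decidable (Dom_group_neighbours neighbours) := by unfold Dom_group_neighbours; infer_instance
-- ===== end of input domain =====

-- ===== PORT A =====
-- B differs by per-length selection (distinct lengths, then filter+sort per length)
-- instead of A's global sort + consecutive groupby; objective: alternative decomposition.

-- Python's comparison order on the decorated tuples (len, (id, lst)):
-- lexicographic on the ints, then lexicographic on the list; realized exactly by this key
-- into a lexicographically ordered type (Mathlib's List order is Python's list order).
def pvKey (x : Int × (Int × List Int)) : Lex (Int × Lex (Int × List Int)) :=
  toLex (x.1, toLex x.2)

-- individual.sort() : Python sorts by the tuple value itself; pvKey is exactly that order,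
-- and equal keys are identical tuples, so the stable sort is exact here.
def sort_edges (individual : List (Int × (Int × List Int))) : List (Int × (Int × List Int)) :=
  PySem.List.sorted individual pvKey false

-- the groupby loop: `for k, g in groupby(xs, lambda x: x[0]): groups.append(list(g))`
-- yields the maximal consecutive runs of equal first component, in order (exact port of
-- itertools.groupby consumed this way).
def pyGroupByFst (xs : List (Int × (Int × List Int))) : List (List (Int × (Int × List Int))) :=
  match xs with
  | [] => []
  | x :: rest =>
      (x :: rest.takeWhile (fun y => y.1 == x.1)) ::
        pyGroupByFst (rest.dropWhile (fun y => y.1 == x.1))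
  termination_by xs.length
  decreasing_by
    have := List.length_dropWhile_le (fun y => y.1 == x.1) rest
    simp; omega

def group_neighbours (neighbours : List (Int × List Int)) : List (List (Int × (Int × List Int))) :=
  let sorted_neighbours :=
    neighbours.foldl (fun acc neighbour => acc ++ [((neighbour.2.length : Int), neighbour)]) []
  let sorted_neighbours := sort_edges sorted_neighbours
  pyGroupByFst sorted_neighbours

-- ===== PORT B =====
def group_neighbours_alt (neighbours : List (Int × List Int)) : List (List (Int × (Int × List Int))) :=
  let decorated := neighbours.map (fun nb => ((nb.2.length : Int), nb))
  (PySem.List.sorted (PySem.Set.ofList (decorated.map (fun x => x.1))) (fun k => k) false).map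
    (fun k => PySem.List.sorted (decorated.filter (fun x => x.1 == k)) pvKey false)

-- ===== PRECONDITION & SPEC =====
def Spec_group_neighbours (neighbours : List (Int × List Int)) (out : List (List (Int × (Int × List Int)))) : Prop := out = group_neighbours_alt neighbours
instance (neighbours : List (Int × List Int)) (out : List (List (Int × (Int × List Int)))) : Decidable (Spec_group_neighbours neighbours out) := by unfold Spec_group_neighbours; infer_instance

-- ===== CLAIM (what is proved, stated in full; the proofs are below) =====
def Claim_equal_group_neighbours : Prop := ∀ (neighbours : List (Int × List Int)), Dom_group_neighbours neighbours → Spec_group_neighbours neighbours (group_neighbours neighbours)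

-- ===== LEMMAS AND PROOFS =====

theorem pvKey_injective : Function.Injective pvKey := by
  intro a b h
  unfold pvKey at h
  have h2 := toLex_inj.mp h
  exact Prod.ext (congrArg Prod.fst h2) (toLex_inj.mp (congrArg Prod.snd h2))

-- any pvKey-nondecreasing rearrangement of xs IS sorted(xs) under this order
theorem sorted_pvKey_unique (xs ys : List (Int × (Int × List Int)))
    (h1 : ys.Perm xs) (h2 : ys.Pairwise (fun a b => pvKey a ≤ pvKey b)) :
    PySem.List.sorted xs pvKey false = ys := by
  have hs1 : (PySem.List.sorted xs pvKey false).Perm ys :=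
    (PySem.List.sorted_perm xs pvKey false).trans h1.symm
  exact hs1.eq_of_pairwise (fun a b _ _ hab hba => pvKey_injective (le_antisymm hab hba))
    (PySem.List.sorted_pairwise xs pvKey) h2

-- the per-key buckets, concatenated over nodup covering keys, are a permutation of d
theorem flatMap_buckets_perm (ks : List Int) (d : List (Int × (Int × List Int)))
    (hnd : ks.Nodup) (hcov : ∀ x ∈ d, x.1 ∈ ks) :
    (ks.flatMap (fun k => PySem.List.sorted (d.filter (fun x => x.1 == k)) pvKey false)).Perm d := by
  induction ks generalizing d with
  | nil =>
      have hd : d = [] := by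
        cases d with
        | nil => rfl
        | cons y ys => exact absurd (hcov y (by simp)) (by simp)
      simp [hd]
  | cons k ks ih =>
      have hsplit : (List.filter (fun x => x.1 == k) d ++
          List.filter (fun x => !(x.1 == k)) d).Perm d := List.filter_append_perm _ d
      have hcong : ks.flatMap (fun k' => PySem.List.sorted (d.filter (fun x => x.1 == k')) pvKey false)
          = ks.flatMap (fun k' => PySem.List.sorted
              ((d.filter (fun x => !(x.1 == k))).filter (fun x => x.1 == k')) pvKey false) := by
        apply List.flatMap_congr
        intro k' hk'
        have hkne : k' ≠ k := by
          rintro rfl; exact (List.nodup_cons.mp hnd).1 hk'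
        congr 1
        rw [List.filter_filter]
        apply List.filter_congr
        intro x _
        by_cases hx : x.1 = k'
        · simp [hx, hkne]
        · simp [hx]
      rw [List.flatMap_cons, hcong]
      refine List.Perm.trans (List.Perm.append (PySem.List.sorted_perm _ pvKey false) ?_) hsplit
      apply ih
      · exact (List.nodup_cons.mp hnd).2
      · intro x hx
        rw [List.mem_filter] at hx
        have := hcov x hx.1
        simp at this hx
        tauto

-- membership in a bucket pins the first component
theorem mem_bucket_fst (d : List (Int × (Int × List Int))) (k : Int)
    (x : Int × (Int × List Int))
    (hx : x ∈ PySem.List.sorted (d.filter (fun y => y.1 == k)) pvKey false) : x.1 = k := by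
  rw [PySem.List.mem_sorted, List.mem_filter] at hx
  exact by simpa using hx.2

-- the global sort splits as: sorted distinct keys, each key's bucket sorted
theorem sorted_eq_flatMap (d : List (Int × (Int × List Int))) :
    PySem.List.sorted d pvKey false =
      (PySem.List.sorted (PySem.Set.ofList (d.map (fun x => x.1))) (fun k => k) false).flatMap
        (fun k => PySem.List.sorted (d.filter (fun x => x.1 == k)) pvKey false) := by
  set ks := PySem.List.sorted (PySem.Set.ofList (d.map (fun x => x.1))) (fun k => k) false with hks
  have hlt : ks.Pairwise (· < ·) := PySem.List.sorted_ofList_pairwise_lt _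
  have hnd : ks.Nodup := hlt.imp (fun h => ne_of_lt h)
  have hcov : ∀ x ∈ d, x.1 ∈ ks := by
    intro x hx
    rw [hks, PySem.List.mem_sorted, PySem.Set.mem_ofList]
    exact List.mem_map_of_mem hx
  apply sorted_pvKey_unique
  · exact flatMap_buckets_perm ks d hnd hcov
  · rw [List.flatMap_def, List.pairwise_flatten]
    constructor
    · intro l hl
      rw [List.mem_map] at hl
      obtain ⟨k, -, rfl⟩ := hl
      exact PySem.List.sorted_pairwise _ pvKey
    · rw [List.pairwise_map]
      apply hlt.imp_of_mem
      intro k1 k2 _ _ hklt x hx y hy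
      have h1 := mem_bucket_fst d k1 x hx
      have h2 := mem_bucket_fst d k2 y hy
      apply le_of_lt
      unfold pvKey
      rw [Prod.Lex.toLex_lt_toLex]
      left; rw [h1, h2]; exact hklt

-- groupby over concatenated nonempty constant-key buckets with distinct keys
theorem pyGroupByFst_flatMap (ks : List Int) (d : List (Int × (Int × List Int)))
    (hnd : ks.Nodup) (hne : ∀ k ∈ ks, d.filter (fun x => x.1 == k) ≠ []) :
    pyGroupByFst (ks.flatMap (fun k => PySem.List.sorted (d.filter (fun x => x.1 == k)) pvKey false)) =
      ks.map (fun k => PySem.List.sorted (d.filter (fun x => x.1 == k)) pvKey false) := by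
  induction ks with
  | nil => simp [pyGroupByFst]
  | cons k ks ih =>
      set B := PySem.List.sorted (d.filter (fun x => x.1 == k)) pvKey false with hB
      set rest := ks.flatMap (fun k' => PySem.List.sorted (d.filter (fun x => x.1 == k')) pvKey false) with hrest
      have hBne : B ≠ [] := by
        rw [hB, Ne, PySem.List.sorted_eq_nil_iff]
        exact hne k (by simp)
      obtain ⟨c, cs, hcons⟩ := List.exists_cons_of_ne_nil hBne
      have hc1 : c.1 = k := mem_bucket_fst d k c (by rw [← hB, hcons]; simp)
      have hcs : ∀ z ∈ cs, z.1 = k := by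
        intro z hz
        exact mem_bucket_fst d k z (by rw [← hB, hcons]; simp [hz])
      have hrestne : ∀ z ∈ rest, (z.1 == c.1) = false := by
        intro z hz
        rw [hrest, List.mem_flatMap] at hz
        obtain ⟨k', hk', hzk'⟩ := hz
        have hz1 := mem_bucket_fst d k' z hzk'
        have : k' ≠ k := by rintro rfl; exact (List.nodup_cons.mp hnd).1 hk'
        simp [hz1, hc1, this]
      have htcs : cs.takeWhile (fun y => y.1 == c.1) = cs :=
        List.takeWhile_eq_self_iff.mpr (fun z hz => by simp [hcs z hz, hc1])
      have hdcs : cs.dropWhile (fun y => y.1 == c.1) = [] := by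
        rw [List.dropWhile_eq_nil_iff]
        intro z hz; simp [hcs z hz, hc1]
      have htr : rest.takeWhile (fun y => y.1 == c.1) = [] := by
        cases hr : rest with
        | nil => rfl
        | cons r rs =>
            rw [List.takeWhile_cons, hrestne r (by rw [hr]; simp)]
            simp
      have hdr : rest.dropWhile (fun y => y.1 == c.1) = rest := by
        cases hr : rest with
        | nil => rfl
        | cons r rs =>
            rw [List.dropWhile_cons, hrestne r (by rw [hr]; simp)]
            simp
      rw [List.flatMap_cons, ← hrest, ← hB, hcons, List.cons_append]
      rw [pyGroupByFst]
      rw [List.takeWhile_append, List.dropWhile_append]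
      rw [htcs, hdcs, htr, hdr]
      simp only [List.isEmpty_nil, if_true]
      rw [List.map_cons, ← hB, hcons]
      simp only [List.append_nil]
      congr 1
      exact ih (List.nodup_cons.mp hnd).2 (fun k' hk' => hne k' (by simp [hk']))

-- ===== VERDICT (by name: the statement is the Claim_ definition above) =====
theorem group_neighbours_spec : Claim_equal_group_neighbours := by
  intro neighbours _
  unfold Spec_group_neighbours group_neighbours group_neighbours_alt sort_edges
  rw [PySem.List.foldl_append_singleton_eq_map]
  simp only [List.nil_append]
  set d := neighbours.map (fun nb => ((nb.2.length : Int), nb)) with hd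
  rw [sorted_eq_flatMap]
  set ks := PySem.List.sorted (PySem.Set.ofList (d.map (fun x => x.1))) (fun k => k) false with hks
  have hlt : ks.Pairwise (· < ·) := PySem.List.sorted_ofList_pairwise_lt _
  apply pyGroupByFst_flatMap
  · exact hlt.imp (fun h => ne_of_lt h)
  · intro k hk
    rw [hks, PySem.List.mem_sorted, PySem.Set.mem_ofList, List.mem_map] at hk
    obtain ⟨x, hx, rfl⟩ := hk
    rw [Ne, List.filter_eq_nil_iff]
    intro hall
    have := hall x hx
    simp at this
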